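-- pv_equiv track=rewrite | github.com/mmishra4/DSA | String1.py | minimizeChar
-- ===== SOURCE A (Python) =====
-- def minimizeChar(A, B):
--     char_count = {}
--
--     for char in A:
--         if char not in char_count:
--             char_count[char] = 0
--
--         char_count[char] += 1
--
--     counts = sorted(char_count.values())
--
--     # Current number of distinct characters
--     answer = len(counts)
--
--     # Excluding the last element because there has to be atleast 1 character
--     for i in range(len(counts) - 1):
--         # We can substitute all the characters
--         # Assume you are substituting for the max occurred character
--         if counts[i] <= B:
--             B -= counts[i]
--             answer -= 1
--
--         # If we can't substitute all counts[i]
--         # We definitely can't substitute for any upcoming values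
--         else:
--             break
--
--     return(answer)
-- ===== SOURCE B (Python) =====
-- def minimizeChar(A, B):
--     freq = {}
--     for ch in A:
--         freq[ch] = freq.get(ch, 0) + 1
--     counts = sorted(freq.values())
--     n = len(counts)
--     # prefix sums over the n-1 smallest counts (the largest group always stays)
--     prefix = []
--     s = 0
--     for c in counts[:n - 1]:
--         s += c
--         prefix.append(s)
--     k = 0
--     while k < len(prefix) and prefix[k] <= B:
--         k += 1
--     return n - k
-- ===== Notes on version B (the rewrite author's own statement) =====
-- stated objective: alternative
-- what changed: Replaces A's mutate-budget-and-break index loop over the sorted counts with a table-first pass: build the prefix-sum array of the n-1 smallest counts once, then count how many prefix sums stay within the (unchanged) budget B.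
import Mathlib
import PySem

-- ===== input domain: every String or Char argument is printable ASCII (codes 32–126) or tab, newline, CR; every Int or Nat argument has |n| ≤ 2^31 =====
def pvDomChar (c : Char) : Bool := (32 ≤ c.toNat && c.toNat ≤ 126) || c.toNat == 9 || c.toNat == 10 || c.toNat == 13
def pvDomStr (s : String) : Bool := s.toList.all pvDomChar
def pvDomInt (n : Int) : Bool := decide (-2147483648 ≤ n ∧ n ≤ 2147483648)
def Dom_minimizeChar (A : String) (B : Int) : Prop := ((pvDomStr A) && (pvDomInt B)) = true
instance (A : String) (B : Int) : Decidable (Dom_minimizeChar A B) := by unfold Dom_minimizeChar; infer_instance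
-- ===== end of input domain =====

-- B replaces A's mutate-budget-and-break loop with a prefix-sum table plus a within-budget count (alternative decomposition, same cost).

-- ===== PORT A =====
-- A's 'for i in range(len(counts)-1): if counts[i] <= B: B -= counts[i]; answer -= 1 else: break'
def pvLoopA (counts : List Int) : List Int → Int → Int → Int
  | [], _, answer => answer
  | i :: rest, b, answer =>
    if PySem.List.pyGetD counts i 0 ≤ b then
      pvLoopA counts rest (b - PySem.List.pyGetD counts i 0) (answer - 1)
    else answer

def minimizeChar (A : String) (B : Int) : Int :=
  let char_count := A.toList.foldl (fun d ch =>
    let d' := if d.contains ch then d else d.insert ch (0 : Int)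
    d'.insert ch (d'.getD ch 0 + 1)) PySem.Dict.empty
  let counts := PySem.List.sorted char_count.values (fun x => x) false
  let answer : Int := counts.length
  pvLoopA counts (PySem.List.pyRange 0 ((counts.length : Int) - 1) 1) B answer

-- ===== PORT B =====
-- Source B's 'while k < len(prefix) and prefix[k] <= B: k += 1' (k only moves forward: structural recursion on the prefix list)
def pvCountK : List Int → Int → Int
  | [], _ => 0
  | p :: rest, b => if p ≤ b then 1 + pvCountK rest b else 0

def minimizeChar_alt (A : String) (B : Int) : Int :=
  let freq := A.toList.foldl (fun d ch => d.insert ch (d.getD ch 0 + 1)) PySem.Dict.empty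
  let counts := PySem.List.sorted freq.values (fun x => x) false
  let n := counts.length
  let front := PySem.List.slice counts none (some ((n : Int) - 1))
  let pre := (front.foldl (fun (p : List Int × Int) c => (p.1 ++ [p.2 + c], p.2 + c)) (([] : List Int), (0 : Int))).1
  (n : Int) - pvCountK pre B

-- ===== PRECONDITION & SPEC =====
def Spec_minimizeChar (A : String) (B : Int) (out : Int) : Prop := out = minimizeChar_alt A B
instance (A : String) (B : Int) (out : Int) : Decidable (Spec_minimizeChar A B out) := by unfold Spec_minimizeChar; infer_instance

-- ===== CLAIM (what is proved, stated in full; the proofs are below) =====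
def Claim_equal_minimizeChar : Prop := ∀ (A : String) (B : Int), Dom_minimizeChar A B → Spec_minimizeChar A B (minimizeChar A B)

-- ===== LEMMAS AND PROOFS =====

-- A's dict-building step equals B's: 'insert 0 if absent, then bump' is 'insert getD+1'
theorem pv_fold_dict_eq (l : List Char) (d : PySem.Dict Char Int) :
    l.foldl (fun d ch =>
      let d' := if d.contains ch then d else d.insert ch (0 : Int)
      d'.insert ch (d'.getD ch 0 + 1)) d
    = l.foldl (fun d ch => d.insert ch (d.getD ch 0 + 1)) d := by
  induction l generalizing d with
  | nil => rfl
  | cons c t ih =>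
    simp only [List.foldl_cons]
    have hstep : (let d' := if d.contains c then d else d.insert c (0 : Int)
        d'.insert c (d'.getD c 0 + 1)) = d.insert c (d.getD c 0 + 1) := by
      by_cases h : d.contains c
      · simp [h]
      · simp only [h, Bool.false_eq_true, if_false]
        rw [PySem.Dict.getD_insert_self, PySem.Dict.insert_insert_self,
          PySem.Dict.getD_of_not_contains _ _ (by simpa using h)]
    rw [hstep, ih]

-- prefix sums of l starting from running total s
def pvPrefix (s : Int) : List Int → List Int
  | [] => []
  | c :: t => (s + c) :: pvPrefix (s + c) t

theorem pv_foldl_prefix (l : List Int) (acc : List Int) (s : Int) :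
    (l.foldl (fun (p : List Int × Int) c => (p.1 ++ [p.2 + c], p.2 + c)) (acc, s)).1
      = acc ++ pvPrefix s l := by
  induction l generalizing acc s with
  | nil => simp [pvPrefix]
  | cons c t ih => simp [pvPrefix, ih]

-- A's loop on the index list = the same walk on the list of elements
def pvLoopL : List Int → Int → Int → Int
  | [], _, answer => answer
  | c :: t, b, answer => if c ≤ b then pvLoopL t (b - c) (answer - 1) else answer

theorem pv_loopA_eq_loopL (counts : List Int) (a : Nat) (b ans : Int)
    (ha : a ≤ counts.length - 1) :
    pvLoopA counts (PySem.List.pyRange (a : Int) ((counts.length : Int) - 1) 1) b ans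
      = pvLoopL (counts.dropLast.drop a) b ans := by
  by_cases h : a < counts.length - 1
  · have hlen : 1 ≤ counts.length := by omega
    have hcons : PySem.List.pyRange (a : Int) ((counts.length : Int) - 1) 1
        = (a : Int) :: PySem.List.pyRange ((a : Int) + 1) ((counts.length : Int) - 1) 1 := by
      apply PySem.List.pyRange_one_cons
      omega
    have halt : a < counts.length := by omega
    have hget : PySem.List.pyGetD counts (a : Int) 0 = counts[a] := by
      rw [PySem.List.pyGetD_natCast]
      simp [List.getElem?_eq_getElem halt]
    have hdrop : counts.dropLast.drop a
        = counts[a] :: counts.dropLast.drop (a + 1) := by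
      rw [List.drop_eq_getElem_cons (by simpa [List.length_dropLast] using h)]
      simp [List.getElem_dropLast]
    rw [hcons]
    simp only [pvLoopA, hget]
    rw [hdrop]
    simp only [pvLoopL]
    by_cases hle : counts[a] ≤ b
    · simp only [hle, if_true]
      have := pv_loopA_eq_loopL counts (a + 1) (b - counts[a]) (ans - 1) (by omega)
      simpa [Int.natCast_add] using this
    · simp [hle]
  · have hempty : PySem.List.pyRange (a : Int) ((counts.length : Int) - 1) 1 = [] := by
      have : (counts.length : Int) - 1 ≤ (a : Int) := by omega
      simp only [PySem.List.pyRange, one_ne_zero, ite_false, zero_lt_one, ite_true, one_mul,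
        add_sub_cancel_right, EuclideanDomain.div_one, List.map_eq_nil_iff, List.range_eq_nil,
        ]
      split <;> omega
    have hdrop : counts.dropLast.drop a = [] := by
      apply List.drop_eq_nil_of_le
      simp [List.length_dropLast]; omega
    rw [hempty, hdrop]
    rfl
termination_by counts.length - 1 - a

theorem pv_loopL_eq_count (l : List Int) (s b ans : Int) :
    pvLoopL l (b - s) ans = ans - pvCountK (pvPrefix s l) b := by
  induction l generalizing s ans with
  | nil => simp [pvLoopL, pvPrefix, pvCountK]
  | cons c t ih =>
    simp only [pvLoopL, pvPrefix, pvCountK]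
    by_cases h : c ≤ b - s
    · have h' : s + c ≤ b := by omega
      have := ih (s + c) (ans - 1)
      rw [if_pos h, if_pos h']
      have heq : b - s - c = b - (s + c) := by ring
      rw [heq, this]; ring
    · have h' : ¬ s + c ≤ b := by omega
      rw [if_neg h, if_neg h']; ring

theorem pv_front_eq_dropLast (counts : List Int) :
    PySem.List.slice counts none (some ((counts.length : Int) - 1)) = counts.dropLast := by
  cases counts with
  | nil => rfl
  | cons c t =>
    have h0 : (0:Int) ≤ ((c :: t).length : Int) - 1 := by simp
    rw [PySem.List.slice_to _ h0, List.dropLast_eq_take]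
    congr 1
    simp

theorem pv_main (counts : List Int) (B : Int) :
    pvLoopA counts (PySem.List.pyRange 0 ((counts.length : Int) - 1) 1) B (counts.length : Int)
      = (counts.length : Int) - pvCountK
          (((PySem.List.slice counts none (some ((counts.length : Int) - 1))).foldl
            (fun (p : List Int × Int) c => (p.1 ++ [p.2 + c], p.2 + c)) (([] : List Int), (0 : Int))).1) B := by
  rw [pv_front_eq_dropLast, pv_foldl_prefix, List.nil_append]
  have h := pv_loopA_eq_loopL counts 0 B (counts.length : Int) (by omega)
  simp only [Nat.cast_zero, List.drop_zero] at h
  rw [h]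
  have h2 := pv_loopL_eq_count counts.dropLast 0 B (counts.length : Int)
  simpa using h2

-- ===== VERDICT (by name: the statement is the Claim_ definition above) =====
theorem minimizeChar_spec : Claim_equal_minimizeChar := by
  intro A B _
  unfold Spec_minimizeChar minimizeChar minimizeChar_alt
  simp only []
  rw [pv_fold_dict_eq]
  exact pv_main _ B
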